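-- pv_equiv track=rewrite | github.com/hayleycd/adventofcode2019 | day4.py | remove_multiple_repeats
-- ===== SOURCE A (Python) =====
-- def remove_multiple_repeats(possible_passwords):
--     revised_possible_passwords = []
--     for password in possible_passwords:
--         str_password = str(password)
--         multiple_repeat = False
--         previous_digit = str_password[0]
--         digit_dictionary = {}
--         for digit in str_password:
--             if digit_dictionary.get(digit):
--                 digit_dictionary[digit] += 1
--             else:
--                 digit_dictionary[digit] = 1
--         values_list = list(digit_dictionary.values())
--         double = False
--         multiples = False
--         for value in values_list:
--             if value == 2:
--                 double = True
--             if value > 2: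
--                 multiples = True
--
--         if (not double and not multiples) or (double and multiples) or (double and not multiples):
--             revised_possible_passwords.append(password)
--     return revised_possible_passwords
-- ===== SOURCE B (Python) =====
-- def remove_multiple_repeats(possible_passwords):
--     def run_lengths(chars):
--         # chars is sorted, so all copies of chars[0] form a prefix
--         if not chars:
--             return []
--         n = chars.count(chars[0])
--         return [n] + run_lengths(chars[n:])
--
--     kept = []
--     for password in possible_passwords:
--         lengths = run_lengths(sorted(str(password)))
--         if 2 in lengths or all(v <= 2 for v in lengths):
--             kept.append(password)
--     return kept
-- ===== Notes on version B (the rewrite author's own statement) =====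
-- stated objective: alternative
-- what changed: Replaces A's per-password dictionary counting plus a flag-setting scan over the values with sorting the digits and a recursive run-length decomposition of the sorted string, keeping the password when a run has length 2 or no run exceeds 2.
import Mathlib
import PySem

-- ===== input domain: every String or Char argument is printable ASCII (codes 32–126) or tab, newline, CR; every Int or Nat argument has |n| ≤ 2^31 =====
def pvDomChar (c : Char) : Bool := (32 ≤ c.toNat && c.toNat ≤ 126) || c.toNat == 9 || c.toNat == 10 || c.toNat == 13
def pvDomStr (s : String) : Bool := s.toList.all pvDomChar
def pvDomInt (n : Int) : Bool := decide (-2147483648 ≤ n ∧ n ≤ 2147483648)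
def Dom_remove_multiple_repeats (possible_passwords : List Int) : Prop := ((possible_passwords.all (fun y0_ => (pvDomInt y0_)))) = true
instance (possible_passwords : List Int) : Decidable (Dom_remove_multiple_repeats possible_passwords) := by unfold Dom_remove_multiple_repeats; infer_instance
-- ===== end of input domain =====

-- B replaces A's per-password digit dictionary + value-flag scan by sorting the digits and
-- decomposing the sorted string into run lengths recursively (alternative decomposition, same cost class).

-- ===== PORT A =====
def remove_multiple_repeats (possible_passwords : List Int) : List Int :=
  possible_passwords.foldl (fun revised_possible_passwords password =>
    let str_password := PySem.Int.toChars password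
    let _multiple_repeat := false  -- dead variable in A
    -- str(password) is never empty, so 'str_password[0]' cannot raise; the value is never used
    let _previous_digit := PySem.List.pyGet? str_password 0
    let digit_dictionary := str_password.foldl (fun d digit =>
      if ((d.get? digit).getD 0) ≠ 0 then d.insert digit ((d.get? digit).getD 0 + 1)
      else d.insert digit 1) (PySem.Dict.empty : PySem.Dict Char Int)
    let values_list := digit_dictionary.values
    let db := values_list.foldl (fun (s : Bool × Bool) value =>
      ((if value == 2 then true else s.1), (if value > 2 then true else s.2))) (false, false)
    let double := db.1
    let multiples := db.2
    if (!double && !multiples) || (double && multiples) || (double && !multiples)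
      then revised_possible_passwords ++ [password] else revised_possible_passwords) []

-- ===== PORT B =====
-- run_lengths of Source B: the input is sorted, so all copies of chars[0] form a prefix
def runLengths : List Char → List Int
  | [] => []
  | c :: rest =>
    let n := (c :: rest).count c
    (n : Int) :: runLengths ((c :: rest).drop n)
termination_by l => l.length
decreasing_by
  have h1 : 0 < (c :: rest).count c := List.count_pos_iff.mpr (List.mem_cons_self)
  simp only [List.length_drop, List.length_cons]
  omega

def remove_multiple_repeats_alt (possible_passwords : List Int) : List Int :=
  possible_passwords.foldl (fun kept password =>
    let lengths := runLengths (PySem.List.sorted (PySem.Int.toChars password) (fun x => x) false)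
    if lengths.contains 2 || lengths.all (fun v => v ≤ 2)
      then kept ++ [password] else kept) []

-- ===== PRECONDITION & SPEC =====
def Spec_remove_multiple_repeats (possible_passwords : List Int) (out : List Int) : Prop := out = remove_multiple_repeats_alt possible_passwords
instance (possible_passwords : List Int) (out : List Int) : Decidable (Spec_remove_multiple_repeats possible_passwords out) := by unfold Spec_remove_multiple_repeats; infer_instance

-- ===== CLAIM (what is proved, stated in full; the proofs are below) =====
def Claim_equal_remove_multiple_repeats : Prop := ∀ (possible_passwords : List Int), Dom_remove_multiple_repeats possible_passwords → Spec_remove_multiple_repeats possible_passwords (remove_multiple_repeats possible_passwords)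

-- ===== LEMMAS AND PROOFS =====

-- A's counting loop is pointwise the standard counter loop
lemma counter_step_eq (d : PySem.Dict Char Int) (x : Char) :
    (if ((d.get? x).getD 0) ≠ 0 then d.insert x ((d.get? x).getD 0 + 1) else d.insert x 1)
      = d.insert x (d.getD x 0 + 1) := by
  rw [PySem.Dict.getD_eq_get?_getD]
  by_cases h : (d.get? x).getD 0 = 0 <;> simp [h]

lemma values_counting_loop (l : List Char) :
    (l.foldl (fun d digit =>
      if ((d.get? digit).getD 0) ≠ 0 then d.insert digit ((d.get? digit).getD 0 + 1)
      else d.insert digit 1) (PySem.Dict.empty : PySem.Dict Char Int)).values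
    = (PySem.Set.ofList l).map (fun c => (l.count c : Int)) := by
  have hf : (fun (d : PySem.Dict Char Int) (digit : Char) =>
      if ((d.get? digit).getD 0) ≠ 0 then d.insert digit ((d.get? digit).getD 0 + 1)
      else d.insert digit 1) = (fun d x => d.insert x (d.getD x 0 + 1)) := by
    funext d x; exact counter_step_eq d x
  rw [hf, PySem.Dict.foldl_insert_getD_add_one_eq_counter]
  simp [PySem.Dict.values, PySem.Dict.items_counter]

-- A's flag-setting scan computes two 'any's
lemma flags_loop (vals : List Int) : ∀ (a b : Bool),
    (vals.foldl (fun (s : Bool × Bool) value =>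
      ((if value == 2 then true else s.1), (if value > 2 then true else s.2))) (a, b))
    = (a || vals.any (fun v => v == 2), b || vals.any (fun v => decide (2 < v))) := by
  have e1 : ∀ (a : Bool) (x : Int), (if x == 2 then true else a) = (a || (x == 2)) := by
    intro a x; by_cases h : x = (2 : Int) <;> simp [h]
  have e2 : ∀ (b : Bool) (x : Int), (if x > 2 then true else b) = (b || decide (2 < x)) := by
    intro b x; by_cases h : 2 < x <;> simp [h]
  induction vals with
  | nil => simp
  | cons x xs ih =>
    intro a b
    rw [List.foldl_cons]
    have hstep : ((if x == 2 then true else (a, b).1), (if x > 2 then true else (a, b).2))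
        = (a || (x == 2), b || decide (2 < x)) := by
      simp only [e1, e2]
    rw [hstep, ih, List.any_cons, List.any_cons, Bool.or_assoc, Bool.or_assoc]

-- run lengths of a sorted list are exactly the multiplicities of its members
lemma sorted_head_block (l : List Char) (h : l.Pairwise (· ≤ ·)) (c : Char)
    (hc : ∀ x ∈ l, c ≤ x) :
    l.take (l.count c) = List.replicate (l.count c) c ∧ c ∉ l.drop (l.count c) := by
  induction l with
  | nil => simp
  | cons x xs ih =>
    have hx : ∀ y ∈ xs, x ≤ y := fun y hy => List.rel_of_pairwise_cons h hy
    have hxs : xs.Pairwise (· ≤ ·) := h.of_cons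
    by_cases hxc : x = c
    · subst hxc
      obtain ⟨ht, hd⟩ := ih hxs hx
      constructor
      · simp [List.count_cons_self, List.take_succ_cons, ht, List.replicate_succ]
      · simpa [List.count_cons_self] using hd
    · have hcnt : xs.count c = 0 := by
        rw [List.count_eq_zero]
        intro hmem
        exact hxc (le_antisymm (hx c hmem) (hc x List.mem_cons_self))
      have hcnt' : (x :: xs).count c = 0 := by
        rw [List.count_cons, hcnt]
        simp [fun h' : x = c => hxc h']
      refine ⟨by simp [hcnt'], ?_⟩
      simp only [hcnt', List.drop_zero]
      intro hmem
      rcases List.mem_cons.mp hmem with h' | h'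
      · exact hxc h'.symm
      · exact hxc (le_antisymm (hx c h') (hc x List.mem_cons_self))

lemma mem_runLengths (l : List Char) (h : l.Pairwise (· ≤ ·)) (v : Int) :
    v ∈ runLengths l ↔ ∃ c ∈ l, (l.count c : Int) = v := by
  induction l using runLengths.induct with
  | case1 => simp [runLengths]
  | case2 c rest n ih =>
    set l := c :: rest with hl
    have hc : ∀ x ∈ l, c ≤ x := by
      intro x hx
      rcases List.mem_cons.mp hx with h' | h'
      · exact le_of_eq h'.symm
      · exact List.rel_of_pairwise_cons h h'
    obtain ⟨htake, hdrop⟩ := sorted_head_block l h c hc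
    have hsplit : l = List.replicate (l.count c) c ++ l.drop (l.count c) := by
      conv_lhs => rw [← List.take_append_drop (l.count c) l]
      rw [htake]
    have hdp : (l.drop (l.count c)).Pairwise (· ≤ ·) := h.drop
    have hcount : ∀ d ∈ l.drop (l.count c), (l.drop (l.count c)).count d = l.count d := by
      intro d hd
      have hdc : d ≠ c := fun he => hdrop (he ▸ hd)
      conv_rhs => rw [hsplit]
      rw [List.count_append, List.count_replicate]
      simp only [beq_iff_eq]
      rw [if_neg (fun h' : c = d => hdc h'.symm)]
      simp
    have hn : n = l.count c := rfl
    rw [show runLengths l = (n : Int) :: runLengths (l.drop n) from by rw [hl, runLengths]]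
    rw [List.mem_cons, hn, ih hdp]
    constructor
    · rintro (rfl | ⟨d, hd, hv⟩)
      · exact ⟨c, List.mem_cons_self, rfl⟩
      · exact ⟨d, List.mem_of_mem_drop hd, by rw [← hv, hcount d hd]⟩
    · rintro ⟨d, hd, hv⟩
      by_cases hdc : d = c
      · subst hdc; left; rw [← hv]
      · right
        have hd' : d ∈ l.drop (l.count c) := by
          rcases (List.mem_append.mp (hsplit ▸ hd)) with h' | h'
          · exact absurd (List.eq_of_mem_replicate h') hdc
          · exact h'
        exact ⟨d, hd', by rw [← hv, hcount d hd']⟩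

-- the two per-password keep conditions agree
lemma cond_eq (p : Int) :
    (let str_password := PySem.Int.toChars p
     let digit_dictionary := str_password.foldl (fun d digit =>
       if ((d.get? digit).getD 0) ≠ 0 then d.insert digit ((d.get? digit).getD 0 + 1)
       else d.insert digit 1) (PySem.Dict.empty : PySem.Dict Char Int)
     let values_list := digit_dictionary.values
     let db := values_list.foldl (fun (s : Bool × Bool) value =>
       ((if value == 2 then true else s.1), (if value > 2 then true else s.2))) (false, false)
     ((!db.1 && !db.2) || (db.1 && db.2) || (db.1 && !db.2)))
    = (let lengths := runLengths (PySem.List.sorted (PySem.Int.toChars p) (fun x => x) false)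
       (lengths.contains 2 || lengths.all (fun v => v ≤ 2))) := by
  simp only
  set l := PySem.Int.toChars p with hl
  rw [values_counting_loop, flags_loop]
  set s := PySem.List.sorted l (fun x => x) false with hs
  have hperm : List.Perm s l := PySem.List.sorted_perm l (fun x => x) false
  have hpw : s.Pairwise (· ≤ ·) := PySem.List.sorted_pairwise l (fun x => x)
  have hmemrl : ∀ v : Int, v ∈ runLengths s ↔ ∃ c ∈ l, (l.count c : Int) = v := by
    intro v
    rw [mem_runLengths s hpw v]
    constructor
    · rintro ⟨c, hc, hv⟩
      exact ⟨c, hperm.mem_iff.mp hc, by rw [← hv, hperm.count_eq]⟩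
    · rintro ⟨c, hc, hv⟩
      exact ⟨c, hperm.mem_iff.mpr hc, by rw [← hv, hperm.count_eq]⟩
  have hbool : ∀ d m : Bool, ((!d && !m) || (d && m) || (d && !m)) = (d || !m) := by decide
  rw [hbool]
  have h1 : (((PySem.Set.ofList l).map (fun c => (l.count c : Int))).any (fun v => v == 2))
      = (runLengths s).contains 2 := by
    rw [Bool.eq_iff_iff]
    simp only [List.any_eq_true, List.mem_map, beq_iff_eq, List.contains_eq_mem,
      decide_eq_true_eq, PySem.Set.mem_ofList]
    rw [hmemrl]
    constructor
    · rintro ⟨x, ⟨c, hc, hx⟩, rfl⟩; exact ⟨c, hc, hx⟩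
    · rintro ⟨c, hc, hx⟩; exact ⟨2, ⟨c, hc, hx⟩, rfl⟩
  have h2 : (((PySem.Set.ofList l).map (fun c => (l.count c : Int))).any (fun v => decide (2 < v)))
      = !((runLengths s).all (fun v => v ≤ 2)) := by
    rw [Bool.eq_iff_iff]
    simp only [List.any_eq_true, List.mem_map, decide_eq_true_eq,
      Bool.not_eq_eq_eq_not, Bool.not_true, List.all_eq_false, PySem.Set.mem_ofList]
    constructor
    · rintro ⟨x, ⟨c, hc, hx⟩, hgt⟩
      exact ⟨x, (hmemrl x).mpr ⟨c, hc, hx⟩, by simpa using hgt⟩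
    · rintro ⟨x, hx, hgt⟩
      rcases (hmemrl x).mp hx with ⟨c, hc, hv⟩
      exact ⟨x, ⟨c, hc, hv⟩, by simpa using hgt⟩
  simp only [h1, h2, Bool.false_or, Bool.not_not]

-- ===== VERDICT (by name: the statement is the Claim_ definition above) =====
theorem remove_multiple_repeats_spec : Claim_equal_remove_multiple_repeats := by
  intro ps _
  unfold Spec_remove_multiple_repeats remove_multiple_repeats remove_multiple_repeats_alt
  apply PySem.List.foldl_congr_mem
  intro acc p _
  simp only
  rw [cond_eq p]
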